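-- pv_equiv track=rewrite | github.com/hojoon123/PythonAlgorithems | 08.그리디/240115-23_Greedy/12904_A와B.py | solve
-- ===== SOURCE A (Python) =====
-- def solve(s, t):
--     check = False
--     while t:
--         if t[-1] == "A":
--             t.pop()
--         else:
--             t.pop()
--             t.reverse()
--         if s == t:
--             return 1
--
--     return 0
-- ===== SOURCE B (Python) =====
-- def solve(s, t):
--     # Two-pointer view of t with a "flipped" flag instead of popping/reversing
--     # a real list; single final compare.  Does not mutate t (A does).
--     lo, hi = 0, len(t)
--     flipped = False
--     while hi - lo > len(s):
--         if flipped: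
--             last = t[lo]
--             lo += 1
--         else:
--             hi -= 1
--             last = t[hi]
--         if last != "A":
--             flipped = not flipped
--     reduced = t[lo:hi]
--     if flipped:
--         reduced = reduced[::-1]
--     return 1 if reduced == s else 0
-- ===== Notes on version B (the rewrite author's own statement) =====
-- stated objective: faster
-- what changed: Replaced A's repeated pop+full-list-reverse+full-list-compare loop by a two-pointer window over t with a flip flag, shrinking only until the window has len(s) elements and doing a single final compare.
-- intended difference: On inputs with s == t A returns 0 (it only compares after the first pop, so it misses the zero-operation case), while B returns 1, the intended answer since t is already s. — e.g. on solve(["A"], ["A"]): A returns 0, B returns 1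
import Mathlib
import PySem

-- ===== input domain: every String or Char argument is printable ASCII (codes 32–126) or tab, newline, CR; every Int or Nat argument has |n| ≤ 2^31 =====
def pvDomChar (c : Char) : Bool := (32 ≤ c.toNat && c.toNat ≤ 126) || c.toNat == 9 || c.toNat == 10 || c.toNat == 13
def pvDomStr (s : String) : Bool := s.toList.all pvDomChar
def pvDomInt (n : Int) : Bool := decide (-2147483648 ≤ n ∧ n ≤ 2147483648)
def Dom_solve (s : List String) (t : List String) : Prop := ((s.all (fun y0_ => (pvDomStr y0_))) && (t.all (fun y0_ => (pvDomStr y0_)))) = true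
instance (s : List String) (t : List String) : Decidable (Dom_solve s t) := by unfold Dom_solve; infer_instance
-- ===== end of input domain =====

-- B replaces A's pop/reverse/compare-after-every-step loop by a two-pointer window over t with a
-- flip flag and one final compare; equivalence is about the RETURN value only (A mutates t in place,
-- B does not).

-- ===== PORT A =====
-- one iteration's update of t: if t[-1] == "A": t.pop() else: t.pop(); t.reverse()
-- (t[-1] on a nonempty list is t.getLast?.getD "")
def redStep (t : List String) : List String :=
  if t.getLast?.getD "" = "A" then t.dropLast else t.dropLast.reverse

-- while t: <redStep>; if s == t: return 1;  return 0
def solveA_loop (s : List String) (t : List String) : Int :=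
  if t = [] then 0
  else
    let t' := redStep t
    if s = t' then 1 else solveA_loop s t'
termination_by t.length
decreasing_by
  have : (redStep t).length = t.length - 1 := by
    unfold redStep; split <;> simp [List.length_dropLast]
  have : t.length ≠ 0 := by simpa using ‹t ≠ []›
  omega

def solve (s : List String) (t : List String) : Int := solveA_loop s t

-- ===== PORT B =====
-- the `while hi - lo > len(s)` loop of Source B; t[lo] / t[hi-1] are in range under the loop invariant
def solveB_loop (s : List String) (t : List String) (lo hi : Nat) (flipped : Bool) :
    Nat × Nat × Bool :=
  if hi - lo > s.length then
    if flipped then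
      let last := t.getD lo ""
      solveB_loop s t (lo + 1) hi (if last = "A" then flipped else !flipped)
    else
      let last := t.getD (hi - 1) ""
      solveB_loop s t lo (hi - 1) (if last = "A" then flipped else !flipped)
  else (lo, hi, flipped)
termination_by hi - lo
decreasing_by all_goals omega

def solve_alt (s : List String) (t : List String) : Int :=
  match solveB_loop s t 0 t.length false with
  | (lo, hi, flipped) =>
    let reduced := (t.drop lo).take (hi - lo)   -- t[lo:hi]; exact since 0 ≤ lo ≤ hi ≤ len t here
    let reduced := if flipped then reduced.reverse else reduced
    if reduced = s then 1 else 0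

-- ===== PRECONDITION & SPEC =====
-- On inputs with s == t, A returns 0 (it only compares after the first pop, so it misses the
-- zero-operation case) while B returns 1, the intended answer since t is already s.
def D_solve (s : List String) (t : List String) : Prop := s = t
instance (s : List String) (t : List String) : Decidable (D_solve s t) := by unfold D_solve; infer_instance

def Spec_solve (s : List String) (t : List String) (out : Int) : Prop := ¬ D_solve s t → out = solve_alt s t
instance (s : List String) (t : List String) (out : Int) : Decidable (Spec_solve s t out) := by unfold Spec_solve; infer_instance

def pvDiffWitness_solve : List String × List String := (["A"], ["A"])
def pvDiffWitnessOut_solve : Int × Int := (0, 1)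

-- ===== CLAIM (what is proved, stated in full; the proofs are below) =====
def Claim_unchanged_solve : Prop := ∀ (s : List String) (t : List String), Dom_solve s t → Spec_solve s t (solve s t)
def Claim_changed_solve : Prop := Dom_solve (pvDiffWitness_solve.1) (pvDiffWitness_solve.2) ∧ D_solve (pvDiffWitness_solve.1) (pvDiffWitness_solve.2) ∧ solve (pvDiffWitness_solve.1) (pvDiffWitness_solve.2) = pvDiffWitnessOut_solve.1 ∧ solve_alt (pvDiffWitness_solve.1) (pvDiffWitness_solve.2) = pvDiffWitnessOut_solve.2 ∧ pvDiffWitnessOut_solve.1 ≠ pvDiffWitnessOut_solve.2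
def Claim_exact_solve : Prop := ∀ (s : List String) (t : List String), Dom_solve s t → D_solve s t → solve s t ≠ solve_alt s t

-- ===== LEMMAS AND PROOFS =====

def redIter : Nat → List String → List String
  | 0, t => t
  | k + 1, t => redIter k (redStep t)

theorem length_redStep (t : List String) : (redStep t).length = t.length - 1 := by
  unfold redStep; split <;> simp [List.length_dropLast]

theorem redIter_succ (k : Nat) (t : List String) :
    redIter (k + 1) t = redIter k (redStep t) := rfl

-- A's loop in closed form: reduce until the length of s, compare there, else 0
theorem solveA_loop_eq (s t : List String) :
    solveA_loop s t =
      if s.length < t.length ∧ redIter (t.length - s.length) t = s then 1 else 0 := by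
  fun_induction solveA_loop s t
  case case1 => simp
  case case2 t hne t' heq =>
    have ht' : t' = redStep t := rfl
    rw [ht'] at heq
    have hlt : t.length ≠ 0 := by simpa using hne
    have hls : s.length = t.length - 1 := by rw [heq, length_redStep]
    have h1 : t.length - s.length = 1 := by omega
    rw [if_pos ⟨by omega, by rw [h1]; simpa [redIter] using heq.symm⟩]
  case case3 t hne t' hneq ih =>
    have ht' : t' = redStep t := rfl
    rw [ht'] at hneq ih
    rw [ih]
    have hlt : t.length ≠ 0 := by simpa using hne
    have hlen : (redStep t).length = t.length - 1 := length_redStep t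
    by_cases hc : s.length < (redStep t).length
    · have : t.length - s.length = ((redStep t).length - s.length) + 1 := by omega
      rw [this, redIter_succ]
      have : s.length < t.length := by omega
      simp [this, hc]
    · rw [if_neg (by tauto)]
      by_cases hc2 : s.length < t.length
      · have h1 : t.length - s.length = 1 := by omega
        rw [if_neg]
        intro ⟨_, h⟩
        rw [h1] at h
        exact hneq (by simpa [redIter] using h.symm)
      · rw [if_neg (by tauto)]

-- the list represented by a window (lo, hi, flipped) of t
def seg (t : List String) (lo hi : Nat) (flipped : Bool) : List String :=
  let m := (t.drop lo).take (hi - lo)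
  if flipped then m.reverse else m

theorem seg_dropLast (t : List String) (lo hi : Nat) (h1 : lo < hi) (h2 : hi ≤ t.length) :
    ((t.drop lo).take (hi - lo)).dropLast = (t.drop lo).take (hi - 1 - lo) := by
  apply List.ext_getElem?
  intro i
  simp [List.getElem?_dropLast, List.length_take, List.length_drop, List.getElem?_take,
    List.getElem?_drop]
  split_ifs <;> first | rfl | omega

theorem seg_getLast (t : List String) (lo hi : Nat) (h1 : lo < hi) (h2 : hi ≤ t.length) :
    ((t.drop lo).take (hi - lo)).getLast? = t[hi - 1]? := by
  rw [List.getLast?_eq_getElem?]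
  simp only [List.length_take, List.length_drop]
  rw [List.getElem?_take_of_lt (by omega), List.getElem?_drop]
  congr 1; omega

theorem seg_head (t : List String) (lo hi : Nat) (h1 : lo < hi) :
    ((t.drop lo).take (hi - lo)).head? = t[lo]? := by
  rw [List.head?_eq_getElem?, List.getElem?_take_of_lt (by omega), List.getElem?_drop]
  simp

theorem seg_tail (t : List String) (lo hi : Nat) (h1 : lo < hi) (h2 : hi ≤ t.length) :
    ((t.drop lo).take (hi - lo)).tail = (t.drop (lo + 1)).take (hi - (lo + 1)) := by
  apply List.ext_getElem?
  intro i
  simp [List.getElem?_tail, List.getElem?_take, List.getElem?_drop]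
  split_ifs <;> first | (congr 1; omega) | rfl

-- one iteration of B's loop performs redStep on the represented list
theorem redStep_seg_false (t : List String) (lo hi : Nat) (h1 : lo < hi) (h2 : hi ≤ t.length) :
    redStep (seg t lo hi false) =
      seg t lo (hi - 1) (if t.getD (hi - 1) "" = "A" then false else !false) := by
  have hin : hi - 1 < t.length := by omega
  unfold redStep seg
  simp only [if_neg Bool.false_ne_true, List.getD_eq_getElem?_getD,
    seg_getLast t lo hi h1 h2, seg_dropLast t lo hi h1 h2]
  rw [List.getElem?_eq_getElem hin]
  split_ifs <;> simp_all

theorem redStep_seg_true (t : List String) (lo hi : Nat) (h1 : lo < hi) (h2 : hi ≤ t.length) :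
    redStep (seg t lo hi true) =
      seg t (lo + 1) hi (if t.getD lo "" = "A" then true else !true) := by
  have hin : lo < t.length := by omega
  have hh : ((t.drop lo).take (hi - lo)).head? = t[lo]? := seg_head t lo hi h1
  have ht : ((t.drop lo).take (hi - lo)).tail = (t.drop (lo + 1)).take (hi - (lo + 1)) :=
    seg_tail t lo hi h1 h2
  unfold redStep seg
  simp only [if_true, Bool.not_true, List.getLast?_reverse, hh, List.dropLast_reverse, ht,
    List.getD_eq_getElem?_getD, List.getElem?_eq_getElem hin, Option.getD_some]
  by_cases hA : t[lo] = "A" <;> simp [hA]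

theorem redStep_seg (t : List String) (lo hi : Nat) (f : Bool) (h1 : lo < hi)
    (h2 : hi ≤ t.length) :
    redStep (seg t lo hi f) =
      if f then seg t (lo + 1) hi (if t.getD lo "" = "A" then f else !f)
      else seg t lo (hi - 1) (if t.getD (hi - 1) "" = "A" then f else !f) := by
  cases f
  · simpa using redStep_seg_false t lo hi h1 h2
  · simpa using redStep_seg_true t lo hi h1 h2

-- B's loop iterates redStep (hi-lo)−|s| times on the represented list
theorem solveB_loop_eq (s t : List String) (lo hi : Nat) (f : Bool)
    (h1 : lo ≤ hi) (h2 : hi ≤ t.length) :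
    seg t (solveB_loop s t lo hi f).1 (solveB_loop s t lo hi f).2.1
        (solveB_loop s t lo hi f).2.2 =
      redIter ((hi - lo) - s.length) (seg t lo hi f) := by
  fun_induction solveB_loop s t lo hi f with
  | case1 lo hi hgt last ih =>
    -- flipped branch
    simp only [dite_eq_ite] at ih
    have hlt : lo < hi := by omega
    have : (hi - lo) - s.length = ((hi - (lo + 1)) - s.length) + 1 := by omega
    rw [ih (by omega) h2, this, redIter_succ, redStep_seg t lo hi true hlt h2]
    have hl : last = t[lo]?.getD "" := List.getD_eq_getElem?_getD
    simp only [hl]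
    simp [List.getD_eq_getElem?_getD]
  | case2 lo hi flipped hgt hflip last ih =>
    have hf : flipped = false := by simpa using hflip
    subst hf
    simp only [dite_eq_ite] at ih
    have hlt : lo < hi := by omega
    have : (hi - lo) - s.length = ((hi - 1 - lo) - s.length) + 1 := by omega
    rw [ih (by omega) (by omega), this, redIter_succ, redStep_seg t lo hi false hlt h2]
    have hl : last = t[hi - 1]?.getD "" := List.getD_eq_getElem?_getD
    simp only [hl]
    simp [List.getD_eq_getElem?_getD]
  | case3 lo hi f hle =>
    have : (hi - lo) - s.length = 0 := by omega
    rw [this]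
    rfl

-- B in closed form
theorem solve_alt_eq (s t : List String) :
    solve_alt s t = if redIter (t.length - s.length) t = s then 1 else 0 := by
  unfold solve_alt
  have h := solveB_loop_eq s t 0 t.length false (by omega) (by omega)
  have hseg : seg t 0 t.length false = t := by simp [seg]
  rw [hseg] at h
  rcases hB : solveB_loop s t 0 t.length false with ⟨lo, hi, f⟩
  rw [hB] at h
  simp only at h ⊢
  rw [show ((if f then ((t.drop lo).take (hi - lo)).reverse else (t.drop lo).take (hi - lo)))
      = seg t lo hi f by simp [seg], h]
  simp

-- ===== VERDICT (by name: the statement is the Claim_ definition above) =====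
theorem solve_spec : Claim_unchanged_solve := by
  intro s t _ hD
  show solve s t = solve_alt s t
  unfold solve
  rw [solveA_loop_eq, solve_alt_eq]
  by_cases hc : s.length < t.length
  · simp [hc]
  · have h0 : t.length - s.length = 0 := by omega
    rw [h0]
    have : ¬ (redIter 0 t = s) := by
      intro h; exact hD (by simpa [redIter, D_solve] using h.symm)
    simp [hc, this]

theorem solve_changed : Claim_changed_solve := by
  unfold Claim_changed_solve
  refine ⟨by decide, by decide, ?_, ?_, by decide⟩
  · show solve ["A"] ["A"] = 0
    unfold solve
    rw [solveA_loop_eq]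
    norm_num
  · show solve_alt ["A"] ["A"] = 1
    rw [solve_alt_eq]
    norm_num [redIter]

theorem solve_tight : Claim_exact_solve := by
  intro s t _ hD
  have hst : s = t := hD
  unfold solve
  rw [solveA_loop_eq, solve_alt_eq, hst]
  simp [redIter]
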